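-- pv_equiv track=rewrite | github.com/sanjaradylov/sparse-cheml | sparse_cheml/preprocessing/_group.py | make_group_map_groupyr
-- ===== SOURCE A (Python) =====
-- _REMAINING = '<REMAINING>'
--
-- DEFAULT_GROUP_PREFIXES = (
--     'ecfp', 'fr_', 'FpDensityMorgan', 'PEOE', 'VSA_', 'EState_', 'SlogP_',
--     'SMR_', 'Kappa', 'Chi', 'BCUT2D', 'MolWt', 'EStateIndex', 'PartialCharge',
-- )
--
-- def make_group_map_groupyr(feature_names, group_prefixes=None):
--     """Get group-to-count map for estimators from ``groupyr`` package.
--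
--     Parameters
--     ----------
--     feature_names : iterable of str
--     group_prefixes : sequence of str, default=None
--         Defaults to ``sparse_cheml.preprocessing.DEFAULT_GROUP_PREFIXES``.
--
--     Returns
--     -------
--     dict, str -> int
--     """
--     group_prefixes = group_prefixes or DEFAULT_GROUP_PREFIXES
--     group_map = dict.fromkeys(group_prefixes + (_REMAINING,), tuple())
--
--     for feature_index, feature in enumerate(feature_names):
--         for key in group_map:
--             if key in feature:
--                 group_map[key] += (feature_index,)
--                 break
--         else:
--             group_map[_REMAINING] += (feature_index,)
--
--     return group_map
-- ===== SOURCE B (Python) =====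
-- _REMAINING = '<REMAINING>'
--
-- DEFAULT_GROUP_PREFIXES = (
--     'ecfp', 'fr_', 'FpDensityMorgan', 'PEOE', 'VSA_', 'EState_', 'SlogP_',
--     'SMR_', 'Kappa', 'Chi', 'BCUT2D', 'MolWt', 'EStateIndex', 'PartialCharge',
-- )
--
--
-- def make_group_map_groupyr(feature_names, group_prefixes=None):
--     """Key-major re-implementation: each key partitions a shrinking worklist of
--     still-unclaimed (index, feature) pairs; the ``_REMAINING`` entry finally
--     also picks up every index no key claimed."""
--     keys = list(dict.fromkeys(list(group_prefixes or DEFAULT_GROUP_PREFIXES)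
--                               + [_REMAINING]))
--     features = list(feature_names)
--     unclaimed = list(enumerate(features))
--     group_map = {}
--     for key in keys:
--         taken, left = [], []
--         for index, feature in unclaimed:
--             if key in feature:
--                 taken.append(index)
--             else:
--                 left.append((index, feature))
--         group_map[key] = tuple(taken)
--         unclaimed = left
--     rem = set(group_map[_REMAINING])
--     left_ids = set(index for index, _ in unclaimed)
--     group_map[_REMAINING] = tuple(
--         i for i in range(len(features)) if i in rem or i in left_ids)
--     return group_map
-- ===== Notes on version B (the rewrite author's own statement) =====
-- stated objective: alternative
-- what changed: Feature-major first-match loop over a fromkeys dict is replaced by a key-major traversal: each key partitions a shrinking worklist of still-unclaimed (index, feature) pairs into taken/left, and the <REMAINING> entry finally also picks up every leftover index.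
import Mathlib
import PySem

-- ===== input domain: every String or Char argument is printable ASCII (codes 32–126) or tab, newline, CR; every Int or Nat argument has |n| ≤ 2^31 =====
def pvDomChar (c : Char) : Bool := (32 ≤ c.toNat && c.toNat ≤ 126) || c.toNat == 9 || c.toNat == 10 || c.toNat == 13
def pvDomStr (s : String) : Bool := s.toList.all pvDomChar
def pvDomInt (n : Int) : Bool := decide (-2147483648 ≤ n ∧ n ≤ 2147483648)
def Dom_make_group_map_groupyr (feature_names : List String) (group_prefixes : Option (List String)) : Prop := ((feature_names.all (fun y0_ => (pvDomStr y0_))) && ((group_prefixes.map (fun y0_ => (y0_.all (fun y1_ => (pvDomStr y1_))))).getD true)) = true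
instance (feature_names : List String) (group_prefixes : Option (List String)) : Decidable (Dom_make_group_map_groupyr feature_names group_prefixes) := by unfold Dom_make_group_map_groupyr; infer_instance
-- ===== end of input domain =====

-- B replaces A's feature-major first-match loop over a fromkeys dict by a key-major
-- traversal with a claimed-index set (objective: alternative decomposition, same cost).

-- ===== PORT A =====
def pvRemaining : String := "<REMAINING>"

def pvDefaultGroupPrefixes : List String :=
  ["ecfp", "fr_", "FpDensityMorgan", "PEOE", "VSA_", "EState_", "SlogP_",
   "SMR_", "Kappa", "Chi", "BCUT2D", "MolWt", "EStateIndex", "PartialCharge"]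

-- the inner `for key in group_map: if key in feature: … break` loop: first key that is a substring
def pvFirstMatch (keys : List String) (feature : String) : Option String :=
  match keys with
  | [] => none
  | k :: rest => if PySem.Str.isIn k feature then some k else pvFirstMatch rest feature

-- one iteration of A's outer loop (body of `for feature_index, feature in enumerate(...)`)
def pvAStep (d : PySem.Dict String (List Int)) (p : Int × String) : PySem.Dict String (List Int) :=
  match pvFirstMatch d.keys p.2 with
  | some key => d.modify key [] (fun t => t ++ [p.1])      -- group_map[key] += (feature_index,)
  | none => d.modify pvRemaining [] (fun t => t ++ [p.1])  -- for-else: group_map[_REMAINING] += …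

def make_group_map_groupyr (feature_names : List String) (group_prefixes : Option (List String)) : List (String × List Int) :=
  let gp : List String :=
    match group_prefixes with
    | none => pvDefaultGroupPrefixes
    | some l => if l.isEmpty then pvDefaultGroupPrefixes else l  -- `group_prefixes or DEFAULT…`
  -- dict.fromkeys(group_prefixes + (_REMAINING,), tuple())
  let init : PySem.Dict String (List Int) :=
    PySem.Dict.mk ((PySem.List.dedup (gp ++ [pvRemaining])).map (fun k => (k, ([] : List Int))))
  ((PySem.List.enumerate feature_names).foldl pvAStep init).items

-- ===== PORT B =====
-- body of B's inner `for index, feature in unclaimed` partition loop for one key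
def pvBInnerStep (key : String) (s : List Int × List (Int × String)) (p : Int × String) :
    List Int × List (Int × String) :=
  if PySem.Str.isIn key p.2 then (s.1 ++ [p.1], s.2) else (s.1, s.2 ++ [p])

-- body of B's outer `for key in keys` loop: partition the worklist, record the taken indices
def pvBOuterStep (st : List (Int × String) × PySem.Dict String (List Int)) (key : String) :
    List (Int × String) × PySem.Dict String (List Int) :=
  let r := st.1.foldl (pvBInnerStep key) ([], [])
  (r.2, st.2.insert key r.1)

def make_group_map_groupyr_alt (feature_names : List String) (group_prefixes : Option (List String)) : List (String × List Int) :=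
  let keys : List String :=
    PySem.List.dedup
      ((match group_prefixes with
        | none => pvDefaultGroupPrefixes
        | some l => if l.isEmpty then pvDefaultGroupPrefixes else l) ++ [pvRemaining])
  let features := feature_names
  let st := keys.foldl pvBOuterStep (PySem.List.enumerate features, PySem.Dict.mk [])
  -- `group_map[_REMAINING]` cannot miss: `_REMAINING` is always one of the keys (getD is exact here)
  let rem : PySem.Set Int := PySem.Set.ofList (st.2.getD pvRemaining [])
  let left_ids : PySem.Set Int := PySem.Set.ofList (st.1.map (·.1))
  (st.2.insert pvRemaining
    ((PySem.List.pyRange 0 features.length 1).filter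
      (fun i => PySem.Set.contains rem i || PySem.Set.contains left_ids i))).items

-- ===== PRECONDITION & SPEC =====
def Spec_make_group_map_groupyr (feature_names : List String) (group_prefixes : Option (List String)) (out : List (String × List Int)) : Prop := out = make_group_map_groupyr_alt feature_names group_prefixes
instance (feature_names : List String) (group_prefixes : Option (List String)) (out : List (String × List Int)) : Decidable (Spec_make_group_map_groupyr feature_names group_prefixes out) := by unfold Spec_make_group_map_groupyr; infer_instance

-- ===== CLAIM (what is proved, stated in full; the proofs are below) =====
def Claim_equal_make_group_map_groupyr : Prop := ∀ (feature_names : List String) (group_prefixes : Option (List String)), Dom_make_group_map_groupyr feature_names group_prefixes → Spec_make_group_map_groupyr feature_names group_prefixes (make_group_map_groupyr feature_names group_prefixes)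

-- ===== LEMMAS AND PROOFS =====

-- the key A's inner loop assigns a feature to, for key list ks
def pvClassify (ks : List String) (f : String) : String := (pvFirstMatch ks f).getD pvRemaining

theorem pvFirstMatch_mem {ks : List String} {f k : String} (h : pvFirstMatch ks f = some k) : k ∈ ks := by
  induction ks with
  | nil => simp [pvFirstMatch] at h
  | cons a t ih =>
    rw [pvFirstMatch] at h
    split at h
    · simp at h; simp [h]
    · exact List.mem_cons_of_mem _ (ih h)

theorem pvClassify_mem {ks : List String} (hRem : pvRemaining ∈ ks) (f : String) :
    pvClassify ks f ∈ ks := by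
  unfold pvClassify
  cases h : pvFirstMatch ks f with
  | none => simpa using hRem
  | some k => simpa using pvFirstMatch_mem h

-- A's step, on a dict whose keys are ks, is a `modify` at pvClassify ks
theorem pvAStep_eq (d : PySem.Dict String (List Int)) (p : Int × String) (ks : List String)
    (hk : d.keys = ks) :
    pvAStep d p = d.modify (pvClassify ks p.2) [] (fun t => t ++ [p.1]) := by
  unfold pvAStep pvClassify
  rw [hk]
  cases h : pvFirstMatch ks p.2 <;> simp

-- invariant of A's fold: keys stay ks, and each key's value grows by its matching indices
theorem pvA_inv (ks : List String) (hRem : pvRemaining ∈ ks) (l : List (Int × String)) :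
    ∀ (d : PySem.Dict String (List Int)), d.keys = ks →
      (l.foldl pvAStep d).keys = ks ∧
      ∀ k, (l.foldl pvAStep d).getD k [] =
        d.getD k [] ++ (l.filter (fun p => pvClassify ks p.2 == k)).map (·.1) := by
  induction l with
  | nil => intro d hk; simp [hk]
  | cons p t ih =>
    intro d hk
    have hcont : d.contains (pvClassify ks p.2) = true :=
      (PySem.Dict.contains_iff_mem_keys d _).mpr (hk ▸ pvClassify_mem hRem p.2)
    have hk' : (d.modify (pvClassify ks p.2) [] (fun t => t ++ [p.1])).keys = ks := by
      rw [PySem.Dict.keys_modify, PySem.Dict.keys_insert_of_contains _ _ hcont, hk]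
    rw [List.foldl_cons, pvAStep_eq d p ks hk]
    obtain ⟨h1, h2⟩ := ih _ hk'
    refine ⟨h1, fun k => ?_⟩
    rw [h2 k, PySem.Dict.getD_modify]
    by_cases hck : k = pvClassify ks p.2
    · subst hck
      simp
    · have hbk : (pvClassify ks p.2 == k) = false := by simp [Ne.symm hck]
      simp [hck, hbk]

-- B's inner fold partitions the worklist: matching indices taken, the rest kept
theorem pvB_inner (key : String) (l : List (Int × String)) :
    ∀ (acc1 : List Int) (acc2 : List (Int × String)),
      l.foldl (pvBInnerStep key) (acc1, acc2) =
        (acc1 ++ (l.filter (fun p => PySem.Str.isIn key p.2)).map (·.1),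
         acc2 ++ l.filter (fun p => !(PySem.Str.isIn key p.2))) := by
  induction l with
  | nil => intro acc1 acc2; simp
  | cons p t ih =>
    intro acc1 acc2
    rw [List.foldl_cons]
    by_cases hin : PySem.Str.isIn key p.2 = true
    · have hstep : pvBInnerStep key (acc1, acc2) p = (acc1 ++ [p.1], acc2) := by
        unfold pvBInnerStep; rw [hin]; rfl
      rw [hstep, ih, List.filter_cons, List.filter_cons]
      simp only [hin, if_true, Bool.not_true, Bool.false_eq_true, if_false, List.map_cons,
        List.append_assoc, List.singleton_append]
    · have hb : PySem.Str.isIn key p.2 = false := by simpa using hin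
      have hstep : pvBInnerStep key (acc1, acc2) p = (acc1, acc2 ++ [p]) := by
        unfold pvBInnerStep; rw [hb]; rfl
      rw [hstep, ih, List.filter_cons, List.filter_cons]
      simp only [hb, Bool.not_false, Bool.false_eq_true, if_false, if_true,
        List.append_assoc, List.singleton_append]

-- B's outer fold over fresh distinct keys: first-match entries, leftover worklist
theorem pvB_outer (ks : List String) :
    ∀ (u : List (Int × String)) (d : PySem.Dict String (List Int)),
      ks.Nodup →
      (∀ k ∈ ks, d.contains k = false) →
      (ks.foldl pvBOuterStep (u, d)).2.items =
        d.items ++ ks.map (fun k => (k,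
          (u.filter (fun p => pvFirstMatch ks p.2 == some k)).map (·.1))) ∧
      (ks.foldl pvBOuterStep (u, d)).1 =
        u.filter (fun p => (pvFirstMatch ks p.2).isNone) := by
  induction ks with
  | nil =>
    intro u d _ _
    refine ⟨by simp, ?_⟩
    simp [pvFirstMatch]
  | cons k0 t ih =>
    intro u d hnd hfresh
    rw [List.nodup_cons] at hnd
    rw [List.foldl_cons]
    have hstep : pvBOuterStep (u, d) k0 =
        ((u.foldl (pvBInnerStep k0) ([], [])).2,
         d.insert k0 ((u.foldl (pvBInnerStep k0) ([], [])).1)) := rfl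
    rw [hstep, pvB_inner k0 u [] []]
    simp only [List.nil_append]
    have hfresh' : ∀ k ∈ t,
        (d.insert k0 ((u.filter (fun p => PySem.Str.isIn k0 p.2)).map (·.1))).contains k = false := by
      intro k hk
      rw [PySem.Dict.contains_insert]
      have h1 : (k == k0) = false := by
        simp only [beq_eq_false_iff_ne, ne_eq]
        intro h; exact hnd.1 (h ▸ hk)
      rw [h1, hfresh k (List.mem_cons_of_mem _ hk), Bool.or_false]
    obtain ⟨ho1, ho2⟩ := ih (u.filter (fun p => !(PySem.Str.isIn k0 p.2))) _ hnd.2 hfresh'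
    constructor
    · rw [ho1, PySem.Dict.items_insert_of_not_contains _ _
        (hfresh k0 (List.mem_cons_self))]
      rw [List.map_cons, List.append_assoc, List.singleton_append]
      congr 2
      · -- head entry: `key in feature` is exactly `first match of k0 :: t is k0`
        apply congrArg
        apply congrArg
        apply List.filter_congr
        intro q _
        rw [pvFirstMatch]
        by_cases hin : PySem.Str.isIn k0 q.2 = true
        · have hin' : PySem.Chars.isIn k0.toList q.2.toList = true := by simpa using hin
          simp [hin']
        · have hb' : PySem.Chars.isIn k0.toList q.2.toList = false := by
            simpa using hin
          have hne : (pvFirstMatch t q.2 == some k0) = false := by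
            cases h : pvFirstMatch t q.2 with
            | none => simp
            | some k' =>
              have hmem : k' ∈ t := pvFirstMatch_mem h
              have : k' ≠ k0 := by intro e; exact hnd.1 (e ▸ hmem)
              simp [this]
          simp [hb', hne]
      · -- tail entries: filtering the leftovers by `first match in t` is filtering u by `first match in k0 :: t`
        apply List.map_congr_left
        intro k hk
        rw [List.filter_filter]
        apply congrArg fun x => (k, x)
        apply congrArg
        apply List.filter_congr
        intro q _
        rw [pvFirstMatch]
        by_cases hin : PySem.Str.isIn k0 q.2 = true
        · have hin' : PySem.Chars.isIn k0.toList q.2.toList = true := by simpa using hin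
          have hkne : k ≠ k0 := by intro e; exact hnd.1 (e ▸ hk)
          have hb : (some k0 == some k) = false := by simp [Ne.symm hkne]
          simp [hin', hb]
        · have hb' : PySem.Chars.isIn k0.toList q.2.toList = false := by
            simpa using hin
          simp [hb']
    · rw [ho2, List.filter_filter]
      apply List.filter_congr
      intro q _
      rw [pvFirstMatch]
      by_cases hin : PySem.Str.isIn k0 q.2 = true
      · have hin' : PySem.Chars.isIn k0.toList q.2.toList = true := by simpa using hin
        simp [hin']
      · have hb' : PySem.Chars.isIn k0.toList q.2.toList = false := by
          simpa using hin
        simp [hb']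

theorem pvSet_ofList_contains (l : List Int) (x : Int) :
    PySem.Set.contains (PySem.Set.ofList l) x = decide (x ∈ l) := by
  apply Bool.eq_iff_iff.mpr
  rw [decide_eq_true_eq]
  rw [show PySem.Set.contains (PySem.Set.ofList l) x = true ↔ x ∈ PySem.Set.ofList l from
    by simp [PySem.Set.contains]]
  exact PySem.Set.mem_ofList _ _

-- an index occurs in the projected filtrate iff its own pair passes the filter
theorem pvMem_fst_filter (l : List (Int × String)) (g : Int × String → Bool)
    (p : Int × String) (hp : p ∈ l) (hl : l.Pairwise (fun a b => a.1 ≠ b.1)) :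
    (p.1 ∈ (l.filter g).map (·.1)) ↔ g p = true := by
  constructor
  · intro h
    obtain ⟨q, hq, he⟩ := List.mem_map.mp h
    obtain ⟨hql, hgq⟩ := List.mem_filter.mp hq
    have hndm : (l.map (·.1)).Nodup := List.pairwise_map.mpr hl
    have : q = p := List.inj_on_of_nodup_map hndm hql hp he
    exact this ▸ hgq
  · intro hg
    exact List.mem_map.mpr ⟨p, List.mem_filter.mpr ⟨hp, hg⟩, rfl⟩

-- classification facts relating A's first-match key to B's per-key filters
theorem pvClassify_eq_of_ne (ks : List String) {k : String} (hkR : k ≠ pvRemaining) (f : String) :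
    (pvClassify ks f == k) = (pvFirstMatch ks f == some k) := by
  unfold pvClassify
  cases h : pvFirstMatch ks f with
  | some k' => simp
  | none =>
    have hb : (pvRemaining == k) = false := by simp [Ne.symm hkR]
    simp [hb]

theorem pvClassify_rem_eq (ks : List String) (f : String) :
    (pvClassify ks f == pvRemaining) =
      ((pvFirstMatch ks f == some pvRemaining) || (pvFirstMatch ks f).isNone) := by
  unfold pvClassify
  cases h : pvFirstMatch ks f <;> simp

-- the two loop strategies produce the same items, for any prefix list g
theorem pvMain (fs : List String) (g : List String) :
    ((PySem.List.enumerate fs).foldl pvAStep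
      (PySem.Dict.mk ((PySem.List.dedup (g ++ [pvRemaining])).map
        (fun k => (k, ([] : List Int)))))).items =
    (((PySem.List.dedup (g ++ [pvRemaining])).foldl pvBOuterStep
        (PySem.List.enumerate fs, PySem.Dict.mk [])).2.insert pvRemaining
      ((PySem.List.pyRange 0 fs.length 1).filter
        (fun i => PySem.Set.contains
            (PySem.Set.ofList ((((PySem.List.dedup (g ++ [pvRemaining])).foldl pvBOuterStep
              (PySem.List.enumerate fs, PySem.Dict.mk [])).2).getD pvRemaining [])) i ||
          PySem.Set.contains
            (PySem.Set.ofList ((((PySem.List.dedup (g ++ [pvRemaining])).foldl pvBOuterStep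
              (PySem.List.enumerate fs, PySem.Dict.mk [])).1).map (·.1))) i))).items := by
  have hnd : (PySem.List.dedup (g ++ [pvRemaining])).Nodup := PySem.List.nodup_dedup _
  have hRem : pvRemaining ∈ PySem.List.dedup (g ++ [pvRemaining]) :=
    (PySem.List.mem_dedup _ _).mpr (by simp)
  have hpair : (PySem.List.enumerate fs).Pairwise (fun p q => p.1 ≠ q.1) :=
    (PySem.List.pairwise_lt_enumerate fs 0).imp (fun h => ne_of_lt h)
  -- characterize A's side
  have hk0 : (PySem.Dict.mk ((PySem.List.dedup (g ++ [pvRemaining])).map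
      (fun k => (k, ([] : List Int))))).keys = PySem.List.dedup (g ++ [pvRemaining]) := by
    simp [PySem.Dict.keys, Function.comp_def]
  obtain ⟨hA1, hA2⟩ := pvA_inv _ hRem (PySem.List.enumerate fs) _ hk0
  have hAitems : ((PySem.List.enumerate fs).foldl pvAStep
      (PySem.Dict.mk ((PySem.List.dedup (g ++ [pvRemaining])).map
        (fun k => (k, ([] : List Int)))))).items =
      (PySem.List.dedup (g ++ [pvRemaining])).map (fun k => (k,
        ((PySem.List.enumerate fs).filter
          (fun p => pvClassify (PySem.List.dedup (g ++ [pvRemaining])) p.2 == k)).map (·.1))) := by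
    rw [PySem.Dict.items_eq_map_keys _ (by rw [hA1]; exact hnd) ([] : List Int), hA1]
    apply List.map_congr_left
    intro k hk
    have hg0 : (PySem.Dict.mk ((PySem.List.dedup (g ++ [pvRemaining])).map
        (fun k => (k, ([] : List Int))))).getD k [] = [] := by
      apply PySem.Dict.getD_of_mem_items
      · exact List.mem_map.mpr ⟨k, hk, rfl⟩
      · rw [hk0]; exact hnd
    rw [hA2 k, hg0, List.nil_append]
  -- characterize B's side
  obtain ⟨hB1, hB2⟩ := pvB_outer (PySem.List.dedup (g ++ [pvRemaining]))
    (PySem.List.enumerate fs) (PySem.Dict.mk []) hnd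
    (fun k _ => by simp [PySem.Dict.contains])
  simp only [List.nil_append] at hB1
  have hkeys2 : (((PySem.List.dedup (g ++ [pvRemaining])).foldl pvBOuterStep
      (PySem.List.enumerate fs, PySem.Dict.mk [])).2).keys = PySem.List.dedup (g ++ [pvRemaining]) := by
    simp only [PySem.Dict.keys]
    rw [hB1]
    simp [Function.comp_def]
  have hgetRem : (((PySem.List.dedup (g ++ [pvRemaining])).foldl pvBOuterStep
      (PySem.List.enumerate fs, PySem.Dict.mk [])).2).getD pvRemaining [] =
      ((PySem.List.enumerate fs).filter
        (fun p => pvFirstMatch (PySem.List.dedup (g ++ [pvRemaining])) p.2 == some pvRemaining)).map (·.1) := by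
    apply PySem.Dict.getD_of_mem_items
    · rw [hB1]
      exact List.mem_map.mpr ⟨pvRemaining, hRem, rfl⟩
    · rw [hkeys2]; exact hnd
  have hcontR : (((PySem.List.dedup (g ++ [pvRemaining])).foldl pvBOuterStep
      (PySem.List.enumerate fs, PySem.Dict.mk [])).2).contains pvRemaining = true :=
    (PySem.Dict.contains_iff_mem_keys _ _).mpr (by rw [hkeys2]; exact hRem)
  rw [PySem.Dict.items_insert_of_contains _ _ hcontR, hAitems, hB1, List.map_map]
  apply List.map_congr_left
  intro k hk
  simp only [Function.comp_def]
  by_cases hkR : k = pvRemaining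
  · subst hkR
    rw [if_pos (by simp)]
    refine congrArg (fun x => (pvRemaining, x)) ?_
    -- A's <REMAINING> entry vs B's final overwrite of it
    have hrange : PySem.List.pyRange 0 (fs.length : Int) 1 = (PySem.List.enumerate fs).map (·.1) := by
      rw [PySem.List.map_fst_enumerate, zero_add]
    rw [hrange, List.filter_map]
    refine congrArg (List.map _) ?_
    apply List.filter_congr
    intro p hp
    simp only [Function.comp_def]
    have hmem1 := pvMem_fst_filter (PySem.List.enumerate fs)
      (fun q => pvFirstMatch (PySem.List.dedup (g ++ [pvRemaining])) q.2 == some pvRemaining)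
      p hp hpair
    have hmem2 := pvMem_fst_filter (PySem.List.enumerate fs)
      (fun q => (pvFirstMatch (PySem.List.dedup (g ++ [pvRemaining])) q.2).isNone)
      p hp hpair
    have hremc : PySem.Set.contains (PySem.Set.ofList
        ((((PySem.List.dedup (g ++ [pvRemaining])).foldl pvBOuterStep
          (PySem.List.enumerate fs, PySem.Dict.mk [])).2).getD pvRemaining [])) p.1 =
        (pvFirstMatch (PySem.List.dedup (g ++ [pvRemaining])) p.2 == some pvRemaining) := by
      rw [hgetRem, pvSet_ofList_contains]
      apply Bool.eq_iff_iff.mpr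
      rw [decide_eq_true_eq]
      exact hmem1
    have hleftc : PySem.Set.contains (PySem.Set.ofList
        ((((PySem.List.dedup (g ++ [pvRemaining])).foldl pvBOuterStep
          (PySem.List.enumerate fs, PySem.Dict.mk [])).1).map (·.1))) p.1 =
        (pvFirstMatch (PySem.List.dedup (g ++ [pvRemaining])) p.2).isNone := by
      rw [hB2, pvSet_ofList_contains]
      apply Bool.eq_iff_iff.mpr
      rw [decide_eq_true_eq]
      exact hmem2
    rw [pvClassify_rem_eq, hremc, hleftc]
  · rw [if_neg (by simp [hkR])]
    refine congrArg (fun x => (k, x)) ?_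
    refine congrArg (List.map _) ?_
    apply List.filter_congr
    intro q _
    exact pvClassify_eq_of_ne _ hkR q.2

-- ===== VERDICT (by name: the statement is the Claim_ definition above) =====
theorem make_group_map_groupyr_spec : Claim_equal_make_group_map_groupyr := by
  intro fs gp _
  unfold Spec_make_group_map_groupyr
  exact pvMain fs _
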